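-- pv_equiv track=rewrite | github.com/MALISMF/Computing-Systems-and-Computer-Networks | Task18. Server/main.py | card_to_props
-- ===== SOURCE A (Python) =====
-- from typing import Dict, List, Optional, Set
--
-- def card_to_props(card_id: int) -> Dict[str, int]:
--
--     props = []
--     value = card_id
--     for _ in range(4):
--         props.append(value % 3 + 1)
--         value //= 3
--     color, shape, fill, count = props
--     return {
--         "id": card_id,
--         "color": color,
--         "shape": shape,
--         "fill": fill,
--         "count": count,
--     }
-- ===== SOURCE B (Python) =====
-- # Precompute the full 81-card deck by enumerating property combinations in
-- # order (color varies fastest), then answer each query by a single table lookup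
-- # at card_id % 81; correct because the deck order matches base-3 encoding.
-- _DECK = []
-- for _count in (1, 2, 3):
--     for _fill in (1, 2, 3):
--         for _shape in (1, 2, 3):
--             for _color in (1, 2, 3):
--                 _DECK.append((_color, _shape, _fill, _count))
--
-- def card_to_props(card_id: int):
--     color, shape, fill, count = _DECK[card_id % 81]
--     return {"id": card_id, "color": color, "shape": shape, "fill": fill, "count": count}
-- ===== Notes on version B (the rewrite author's own statement) =====
-- stated objective: alternative
-- what changed: Replaced per-call sequential division/append with a precomputed deck table built once by enumerating every property combination with nested loops (no digit arithmetic), answered by a single lookup at the residue of card_id modulo the deck size.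
import Mathlib
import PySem

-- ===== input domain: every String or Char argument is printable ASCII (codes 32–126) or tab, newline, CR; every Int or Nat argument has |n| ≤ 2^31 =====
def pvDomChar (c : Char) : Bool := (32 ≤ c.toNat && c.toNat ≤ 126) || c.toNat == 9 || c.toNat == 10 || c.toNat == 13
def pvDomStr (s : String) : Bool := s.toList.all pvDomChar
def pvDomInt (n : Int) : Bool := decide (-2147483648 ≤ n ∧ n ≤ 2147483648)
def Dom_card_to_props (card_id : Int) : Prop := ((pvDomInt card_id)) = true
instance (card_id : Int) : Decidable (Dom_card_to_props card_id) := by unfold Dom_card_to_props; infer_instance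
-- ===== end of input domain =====

-- B precomputes the 81-card deck by enumerating property combinations and answers each query
-- by a single table lookup at card_id % 81 (alternative: lookup table instead of digit loop).
-- ===== PORT A =====
def card_to_props (card_id : Int) : List (String × Int) :=
  let st := (List.range 4).foldl
    (fun (st : List Int × Int) _ =>
      (st.1 ++ [PySem.Int.mod st.2 3 + 1], PySem.Int.floordiv st.2 3))
    ([], card_id)
  match st.1 with
  | [color, shape, fill, count] =>
      [("id", card_id), ("color", color), ("shape", shape), ("fill", fill), ("count", count)]
  | _ => []  -- unreachable: the loop appends exactly 4 elements

-- ===== PORT B =====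
-- the module-level _DECK table of Source B: nested loops appending tuples
def pvDeck : List (Int × Int × Int × Int) :=
  (([1, 2, 3] : List Int)).foldl (fun acc count =>
    (([1, 2, 3] : List Int)).foldl (fun acc fill =>
      (([1, 2, 3] : List Int)).foldl (fun acc shape =>
        (([1, 2, 3] : List Int)).foldl (fun acc color =>
          acc ++ [(color, shape, fill, count)]) acc) acc) acc) []

def card_to_props_alt (card_id : Int) : List (String × Int) :=
  match PySem.List.pyGet? pvDeck (PySem.Int.mod card_id 81) with
  | some (color, shape, fill, count) =>
      [("id", card_id), ("color", color), ("shape", shape), ("fill", fill), ("count", count)]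
  | none => []  -- unreachable: 0 ≤ card_id % 81 < 81 = pvDeck.length

-- ===== PRECONDITION & SPEC =====
def Spec_card_to_props (card_id : Int) (out : List (String × Int)) : Prop := out = card_to_props_alt card_id
instance (card_id : Int) (out : List (String × Int)) : Decidable (Spec_card_to_props card_id out) := by unfold Spec_card_to_props; infer_instance

-- ===== CLAIM (what is proved, stated in full; the proofs are below) =====
def Claim_equal_card_to_props : Prop := ∀ (card_id : Int), Dom_card_to_props card_id → Spec_card_to_props card_id (card_to_props card_id)

-- ===== LEMMAS AND PROOFS =====

theorem fdiv_fdiv_three (x : Int) (k : Int) (hk : 0 < k) :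
    PySem.Int.floordiv (PySem.Int.floordiv x k) 3 = PySem.Int.floordiv x (3 * k) := by
  rw [PySem.Int.floordiv_eq_ediv_of_pos hk,
      PySem.Int.floordiv_eq_ediv_of_pos (by omega : (0:Int) < 3),
      PySem.Int.floordiv_eq_ediv_of_pos (by omega : (0:Int) < 3 * k),
      Int.ediv_ediv_of_nonneg (le_of_lt hk), Int.mul_comm k 3]

-- digit k of x % 81 equals digit k of x (for 3^k dividing 81/3)
theorem digit_stable (x k m : Int) (hk : 0 < k) (h81 : (81 : Int) = k * (3 * m)) :
    (x % 81 / k) % 3 = (x / k) % 3 := by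
  have hq : x % 81 = x + (-(3 * m * (x / 81))) * k := by
    rw [Int.emod_def]; ring_nf; rw [h81]; ring
  rw [hq, Int.add_mul_ediv_right _ _ (by omega : k ≠ 0)]
  have : x / k + -(3 * m * (x / 81)) = x / k + 3 * (-(m * (x / 81))) := by ring
  rw [this, Int.add_mul_emod_self_left]

-- the deck entry at any residue 0 ≤ r < 81 is the base-3 digit tuple of r
set_option maxRecDepth 8000 in
theorem deck_get (r : Int) (h0 : 0 ≤ r) (h1 : r < 81) :
    PySem.List.pyGet? pvDeck r =
      some (r % 3 + 1, r / 3 % 3 + 1, r / 9 % 3 + 1, r / 27 % 3 + 1) := by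
  interval_cases r <;> decide

theorem lookup_eq (x : Int) :
    PySem.List.pyGet? pvDeck (PySem.Int.mod x 81) =
      some (PySem.Int.mod x 3 + 1,
            PySem.Int.mod (PySem.Int.floordiv x 3) 3 + 1,
            PySem.Int.mod (PySem.Int.floordiv x 9) 3 + 1,
            PySem.Int.mod (PySem.Int.floordiv x 27) 3 + 1) := by
  have h81 : (0:Int) < 81 := by omega
  rw [PySem.Int.mod_eq_emod_of_pos h81,
      PySem.Int.mod_eq_emod_of_pos (by omega : (0:Int) < 3),
      PySem.Int.mod_eq_emod_of_pos (by omega : (0:Int) < 3),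
      PySem.Int.mod_eq_emod_of_pos (by omega : (0:Int) < 3),
      PySem.Int.mod_eq_emod_of_pos (by omega : (0:Int) < 3),
      PySem.Int.floordiv_eq_ediv_of_pos (by omega : (0:Int) < 3),
      PySem.Int.floordiv_eq_ediv_of_pos (by omega : (0:Int) < 9),
      PySem.Int.floordiv_eq_ediv_of_pos (by omega : (0:Int) < 27),
      deck_get (x % 81) (Int.emod_nonneg x (by omega)) (by
        have := Int.emod_lt_of_pos x h81; omega)]
  rw [Int.emod_emod_of_dvd x (by norm_num : (3:Int) ∣ 81),
      digit_stable x 3 9 (by omega) (by norm_num),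
      digit_stable x 9 3 (by omega) (by norm_num),
      digit_stable x 27 1 (by omega) (by norm_num)]

-- ===== VERDICT (by name: the statement is the Claim_ definition above) =====
theorem card_to_props_spec : Claim_equal_card_to_props := by
  intro card_id _
  unfold Spec_card_to_props card_to_props card_to_props_alt
  simp only [List.range, List.range.loop, List.foldl]
  rw [lookup_eq card_id,
      fdiv_fdiv_three card_id 3 (by omega), show (3:Int) * 3 = 9 by norm_num,
      fdiv_fdiv_three card_id 9 (by omega), show (3:Int) * 9 = 27 by norm_num]
  simp
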